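-- pv_equiv track=rewrite | github.com/compmem/cognax | cognax/df_util.py | map_cat_to_idx
-- ===== SOURCE A (Python) =====
-- def map_cat_to_idx(cats):
--     """
--     Get a dictionary mapping categorical values to a unique index.
--
--     Args:
--         cats: an iterable filled with hashable values
--
--     Returns:
--         a dictionary mapping categorical values to a unique index
--     """
--     cat_to_idx = {}
--     idx = 0
--     for cat in cats:
--         if cat_to_idx.get(cat) is None:
--             cat_to_idx[cat] = idx
--             idx += 1
--
--     return cat_to_idx
-- ===== SOURCE B (Python) =====
-- def map_cat_to_idx(cats):
--     """
--     Get a dictionary mapping categorical values to a unique index.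
--
--     Args:
--         cats: an iterable filled with hashable values
--
--     Returns:
--         a dictionary mapping categorical values to a unique index
--     """
--     cats = list(cats)
--     firsts = [c for i, c in enumerate(cats) if cats.index(c) == i]
--     return {c: r for r, c in enumerate(firsts)}
-- ===== Notes on version B (the rewrite author's own statement) =====
-- stated objective: alternative
-- what changed: Replaces the hash-dict-with-counter single pass by a positional algorithm: keep exactly the positions that are their value's first occurrence (via list.index scans), then enumerate those kept values; no incremental counter or membership dict is maintained.
import Mathlib
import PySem

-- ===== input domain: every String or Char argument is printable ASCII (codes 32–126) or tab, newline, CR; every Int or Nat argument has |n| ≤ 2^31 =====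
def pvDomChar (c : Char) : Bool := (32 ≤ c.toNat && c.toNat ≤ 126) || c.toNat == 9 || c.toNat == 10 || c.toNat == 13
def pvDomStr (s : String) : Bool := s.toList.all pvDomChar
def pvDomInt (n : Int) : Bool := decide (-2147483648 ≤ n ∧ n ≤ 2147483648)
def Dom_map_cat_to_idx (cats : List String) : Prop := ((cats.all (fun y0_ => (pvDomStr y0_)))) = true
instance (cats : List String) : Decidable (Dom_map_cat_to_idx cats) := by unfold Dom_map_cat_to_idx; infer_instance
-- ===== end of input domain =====

-- B replaces A's hash-dict-with-counter pass by a positional algorithm: keep the positions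
-- that are their value's first occurrence (list.index scans), then enumerate the kept values.
-- Objective: alternative (structurally different; not faster).

-- ===== PORT A =====
-- single loop: membership guard, manual index counter, insert into the dict
def map_cat_to_idx (cats : List String) : List (String × Int) :=
  (cats.foldl
    (fun (st : PySem.Dict String Int × Int) cat =>
      if st.1.get? cat = none then (st.1.insert cat st.2, st.2 + 1) else st)
    (PySem.Dict.empty, 0)).1.items

-- ===== PORT B =====
-- firsts = [c for i, c in enumerate(cats) if cats.index(c) == i]; {c: r for r, c in enumerate(firsts)}
def map_cat_to_idx_alt (cats : List String) : List (String × Int) :=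
  let firsts := ((PySem.List.enumerate cats 0).filter
      (fun p => (PySem.List.index? cats p.2).map (fun n => (n : Int)) == some p.1)).map
      (fun p => p.2)
  (PySem.List.enumerate firsts 0).map (fun p => (p.2, p.1))

-- ===== PRECONDITION & SPEC =====
def Spec_map_cat_to_idx (cats : List String) (out : List (String × Int)) : Prop := out = map_cat_to_idx_alt cats
instance (cats : List String) (out : List (String × Int)) : Decidable (Spec_map_cat_to_idx cats out) := by unfold Spec_map_cat_to_idx; infer_instance

-- ===== CLAIM (what is proved, stated in full; the proofs are below) =====
def Claim_equal_map_cat_to_idx : Prop := ∀ (cats : List String), Dom_map_cat_to_idx cats → Spec_map_cat_to_idx cats (map_cat_to_idx cats)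

-- ===== LEMMAS AND PROOFS =====

-- index-annotated list: shape of B's result and of A's dict items
def pvEnumFrom (n : Int) (u : List String) : List (String × Int) :=
  (PySem.List.enumerate u n).map (fun p => (p.2, p.1))

theorem pvEnumFrom_nil (n : Int) : pvEnumFrom n [] = [] := rfl

theorem pvEnumFrom_cons (n : Int) (x : String) (u : List String) :
    pvEnumFrom n (x :: u) = (x, n) :: pvEnumFrom (n + 1) u := by
  simp [pvEnumFrom, PySem.List.enumerate_cons]

theorem pvEnumFrom_append_singleton (n : Int) (u : List String) (c : String) :
    pvEnumFrom n (u ++ [c]) = pvEnumFrom n u ++ [(c, n + u.length)] := by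
  induction u generalizing n with
  | nil => simp [pvEnumFrom_cons, pvEnumFrom_nil]
  | cons x t ih =>
      simp only [List.cons_append, pvEnumFrom_cons, ih, List.length_cons]
      push_cast
      ring_nf

theorem pvGet?_enumFrom (u : List String) (n : Int) (c : String) :
    (PySem.Dict.mk (pvEnumFrom n u)).get? c = none ↔ c ∉ u := by
  induction u generalizing n with
  | nil => simp [pvEnumFrom_nil, PySem.Dict.get?]
  | cons x t ih =>
      rw [pvEnumFrom_cons, PySem.Dict.get?_mk_cons]
      by_cases hx : x = c
      · simp [hx]
      · simp only [beq_iff_eq, hx, if_false, ih, List.mem_cons]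
        constructor
        · intro h h'; rcases h' with h' | h'
          · exact hx h'.symm
          · exact h h'
        · intro h h'; exact h (Or.inr h')

-- A's loop builds exactly the enumerated ordered-dedup of cats
theorem pvLoop (cats : List String) : ∀ (u : List String),
    (cats.foldl
      (fun (st : PySem.Dict String Int × Int) cat =>
        if st.1.get? cat = none then (st.1.insert cat st.2, st.2 + 1) else st)
      (PySem.Dict.mk (pvEnumFrom 0 u), (u.length : Int)))
    = (PySem.Dict.mk (pvEnumFrom 0 (cats.foldl PySem.Set.add u)),
       ((cats.foldl PySem.Set.add u).length : Int)) := by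
  induction cats with
  | nil => intro u; rfl
  | cons c rest ih =>
      intro u
      by_cases hc : c ∈ u
      · have hg : (PySem.Dict.mk (pvEnumFrom 0 u)).get? c ≠ none := by
          rw [Ne, pvGet?_enumFrom]; simpa using hc
        have ha : PySem.Set.add u c = u := by
          simp [PySem.Set.add, List.contains_eq_mem, hc]
        simp only [List.foldl_cons, hg, ha]
        exact ih u
      · have hg : (PySem.Dict.mk (pvEnumFrom 0 u)).get? c = none := by
          rw [pvGet?_enumFrom]; exact hc
        have hcontains : (PySem.Dict.mk (pvEnumFrom 0 u)).contains c = false := by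
          rw [PySem.Dict.contains_eq_isSome_get?, hg]; rfl
        have hins : ((PySem.Dict.mk (pvEnumFrom 0 u)).insert c (u.length : Int))
            = PySem.Dict.mk (pvEnumFrom 0 (u ++ [c])) := by
          apply PySem.Dict.ext
          rw [PySem.Dict.items_insert_of_not_contains _ _ hcontains,
              pvEnumFrom_append_singleton]
          simp
        have ha : PySem.Set.add u c = u ++ [c] := by
          simp [PySem.Set.add, List.contains_eq_mem, hc]
        simp only [List.foldl_cons, hg, if_pos, ha]
        have := ih (u ++ [c])
        simpa [hins, List.length_append] using this

-- the ordered-unique sublist, by head recursion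
def pvUniqRec : List String → List String
  | [] => []
  | c :: rest => c :: pvUniqRec (rest.filter (fun x => x ≠ c))
  termination_by xs => xs.length
  decreasing_by
    simp only [List.length_unattach, List.length_cons, Nat.lt_succ_iff]
    exact le_trans (List.length_filter_le _ _) (by simp)

theorem pvUniqRec_nil : pvUniqRec [] = [] := by rw [pvUniqRec]

theorem pvUniqRec_cons (c : String) (rest : List String) :
    pvUniqRec (c :: rest) = c :: pvUniqRec (rest.filter (fun x => x ≠ c)) := by
  rw [pvUniqRec]

theorem pvUniqRec_filter (p : String → Bool) (xs : List String) :
    pvUniqRec (xs.filter p) = (pvUniqRec xs).filter p := by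
  match xs with
  | [] => rw [List.filter_nil, pvUniqRec_nil, List.filter_nil]
  | c :: rest =>
      by_cases hp : p c
      · have ih2 := pvUniqRec_filter p (rest.filter (fun x => decide (x ≠ c)))
        rw [List.filter_cons, if_pos hp, pvUniqRec_cons, pvUniqRec_cons,
          List.filter_cons, if_pos hp]
        rw [show (rest.filter p).filter (fun x => decide (x ≠ c))
              = (rest.filter (fun x => decide (x ≠ c))).filter p by
            simp only [List.filter_filter]; apply List.filter_congr
            intro a _; exact Bool.and_comm _ _]
        rw [ih2]
      · have ih := pvUniqRec_filter p (rest.filter (fun x => decide (x ≠ c)))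
        rw [List.filter_cons, if_neg hp, pvUniqRec_cons, List.filter_cons, if_neg hp]
        rw [show rest.filter p = (rest.filter (fun x => decide (x ≠ c))).filter p by
            simp only [List.filter_filter]; apply List.filter_congr
            intro a ha
            by_cases hac : a = c
            · subst hac; simp [hp]
            · simp [hac]]
        rw [ih]
  termination_by xs.length
  decreasing_by
    · simp only [List.length_cons, Nat.lt_succ_iff]
      exact le_trans (List.length_filter_le _ _) (by simp)
    · simp only [List.length_cons, Nat.lt_succ_iff]
      exact le_trans (List.length_filter_le _ _) (by simp)

theorem pvAdd_cons (c : String) (u : List String) (xs : List String) :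
    xs.foldl PySem.Set.add (c :: u) = c :: (xs.filter (fun x => x ≠ c)).foldl PySem.Set.add u := by
  induction xs generalizing u with
  | nil => simp
  | cons x rest ih =>
      by_cases hxc : x = c
      · subst hxc
        have : PySem.Set.add (x :: u) x = x :: u := by
          simp [PySem.Set.add, List.contains_eq_mem]
        simp [ih]
      · have : PySem.Set.add (c :: u) x = c :: PySem.Set.add u x := by
          simp only [PySem.Set.add]
          have hc : PySem.Set.contains (c :: u) x = PySem.Set.contains u x := by
            simp [PySem.Set.contains, List.contains_eq_mem, hxc]
          rw [hc]; split_ifs <;> simp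
        simp [hxc, this, ih]

theorem pvOfList_eq_uniqRec (xs : List String) :
    PySem.Set.ofList xs = pvUniqRec xs := by
  match xs with
  | [] => rw [pvUniqRec_nil]; rfl
  | c :: rest =>
      have ih := pvOfList_eq_uniqRec (rest.filter (fun x => x ≠ c))
      show (c :: rest).foldl PySem.Set.add [] = _
      rw [List.foldl_cons]
      have h0 : PySem.Set.add ([] : List String) c = [c] := rfl
      rw [h0, pvAdd_cons c [] rest, pvUniqRec_cons]
      exact congrArg (c :: ·) ih
  termination_by xs.length
  decreasing_by
    simp only [List.length_cons, Nat.lt_succ_iff]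
    exact le_trans (List.length_filter_le _ _) (by simp)

theorem pvEnumShift (xs : List String) (s : Int) :
    PySem.List.enumerate xs s = (PySem.List.enumerate xs 0).map (fun p => (p.1 + s, p.2)) := by
  induction xs generalizing s with
  | nil => simp [PySem.List.enumerate_nil]
  | cons x rest ih =>
      rw [PySem.List.enumerate_cons, PySem.List.enumerate_cons, zero_add,
        ih (s + 1), ih 1, List.map_cons, List.map_map]
      congr 1
      · simp
      · apply List.map_congr_left; intro p _; simp; ring

-- B's kept values are exactly the ordered-unique sublist
theorem pvFirsts_eq_uniqRec (cats : List String) :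
    ((PySem.List.enumerate cats 0).filter
        (fun p => (PySem.List.index? cats p.2).map (fun n => (n : Int)) == some p.1)).map
        (fun p => p.2) = pvUniqRec cats := by
  match cats with
  | [] => simp [PySem.List.enumerate_nil, pvUniqRec_nil]
  | c :: rest =>
      have ih := pvFirsts_eq_uniqRec rest
      rw [PySem.List.enumerate_cons, zero_add, List.filter_cons]
      have hc : ((PySem.List.index? (c :: rest) c).map (fun n => (n : Int)) == some (0 : Int)) = true := by
        rw [PySem.List.index?_cons_self]; rfl
      rw [if_pos hc, List.map_cons]
      rw [pvEnumShift rest 1, List.filter_map, List.map_map,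
        show ((fun (p : Int × String) => p.2) ∘ fun (p : Int × String) => (p.1 + 1, p.2))
          = (fun (p : Int × String) => p.2) from rfl]
      have hcong : ∀ p ∈ PySem.List.enumerate rest 0,
          ((fun p => (PySem.List.index? (c :: rest) p.2).map (fun n => (n : Int)) == some p.1) ∘
            (fun p => (p.1 + 1, p.2))) p
          = (decide (p.2 ≠ c) && ((PySem.List.index? rest p.2).map (fun n => (n : Int)) == some p.1)) := by
        intro p hp
        obtain ⟨k, hk, rfl⟩ := (PySem.List.mem_enumerate_iff _ _ _).1 hp
        by_cases hxc : rest[k] = c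
        · rw [hxc]
          simp only [Function.comp_apply, PySem.List.index?_cons_self]
          simp
          omega

        · simp only [Function.comp_apply]
          rw [PySem.List.index?_cons_of_ne _ (Ne.symm hxc)]
          cases hix : PySem.List.index? rest rest[k] with
          | none => simp [hxc]
          | some m =>
              simp [hxc]
      rw [List.filter_congr hcong]
      have hsplit : (PySem.List.enumerate rest 0).filter
            (fun p => decide (p.2 ≠ c) && ((PySem.List.index? rest p.2).map (fun n => (n : Int)) == some p.1))
          = ((PySem.List.enumerate rest 0).filter
              (fun p => (PySem.List.index? rest p.2).map (fun n => (n : Int)) == some p.1)).filter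
              (fun p => decide (p.2 ≠ c)) := by
        rw [List.filter_filter]
      rw [hsplit]
      have hmapfilter : ∀ (l : List (Int × String)),
          (l.filter (fun p => decide (p.2 ≠ c))).map (fun p => p.2)
          = (l.map (fun p => p.2)).filter (fun x => decide (x ≠ c)) := by
        intro l
        induction l with
        | nil => rfl
        | cons a t iht =>
            rw [List.map_cons, List.filter_cons, List.filter_cons]
            by_cases hac : a.2 = c
            · rw [if_neg (by simp [hac]), if_neg (by simp [hac]), iht]
            · rw [if_pos (by simp [hac]), if_pos (by simp [hac]), List.map_cons, iht]
      rw [hmapfilter, ih, ← pvUniqRec_filter, pvUniqRec_cons]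


-- ===== VERDICT (by name: the statement is the Claim_ definition above) =====
theorem map_cat_to_idx_spec : Claim_equal_map_cat_to_idx := by
  intro cats _
  unfold Spec_map_cat_to_idx map_cat_to_idx map_cat_to_idx_alt
  have h := pvLoop cats []
  have he : PySem.Dict.empty = PySem.Dict.mk (pvEnumFrom 0 ([] : List String)) := rfl
  simp only [List.length_nil, Nat.cast_zero] at h
  rw [he, h]
  show pvEnumFrom 0 (cats.foldl PySem.Set.add []) = _
  rw [pvFirsts_eq_uniqRec, ← pvOfList_eq_uniqRec]
  rfl
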